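-- pv_equiv track=rewrite | github.com/bobicnina/shiny-spork | functions.py | findUnitAndPureClauses
-- ===== SOURCE A (Python) =====
-- def findUnitAndPureClauses(phi, nbvar):
--     unitClauses = dict()
--     pureClauses = dict()
--     nbOfRepeats = dict()
--
--     ''' check cnfFormula and change value in dictionary
--     possible dictionary's values: True  = appear as p
--                                   False = appear as -p
--                                   None  = appear as p and -p '''
--     for l in phi:
--         if len(l) == 1:                         #unit clause
--             for var in l:
--                 value = l[var]
--                 if var in unitClauses and value != unitClauses[var]:
--                     return False, False, False #if l and -l in it, clause can't be true
--                 elif not (var in unitClauses):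
--                     unitClauses[var] = value
--
--     for l in phi:
--         for var in l:                   #general case
--             value = l[var]
--             if var in unitClauses:
--                 continue;               #var is already in unitClauses, skip
--
--             if var in nbOfRepeats:
--                 nbOfRepeats[var] += 1
--             else:
--                 nbOfRepeats[var] = 1
--
--             if var in pureClauses:
--
--                 if pureClauses[var] is not value:
--                     pureClauses[var] = None #var is already in pureClauses
--                                             #but in other form, so we delete it
--             else:
--                 pureClauses[var] = value    #var is not in pureClauses yet
--
--     pureClausesOld = dict(pureClauses)
--     for var in pureClausesOld:
--         value = pureClauses[var]
--         if value is None: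
--             del pureClauses[var]
--         else:
--             del nbOfRepeats[var]    #if p=None then remove from pureClauses and fix nbOfRepeats
--
--     return unitClauses, pureClauses, nbOfRepeats
-- ===== SOURCE B (Python) =====
-- def findUnitAndPureClauses(phi, nbvar):
--     # pass 1: unit clauses (first occurrence wins; contradictory units abort)
--     unitClauses = {}
--     for l in phi:
--         if len(l) == 1:
--             (var, value), = l.items()
--             prev = unitClauses.setdefault(var, value)
--             if prev != value:
--                 return False, False, False
--     # pass 2: index every non-unit variable to the list of its polarities, in order
--     occ = {}
--     for l in phi:
--         for var, value in l.items():
--             if var not in unitClauses: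
--                 occ.setdefault(var, []).append(value)
--     # pass 3: classify each indexed variable as pure or repeated
--     pureClauses = {}
--     nbOfRepeats = {}
--     for var, vals in occ.items():
--         if all(v is vals[0] for v in vals):
--             pureClauses[var] = vals[0]
--         else:
--             nbOfRepeats[var] = len(vals)
--     return unitClauses, pureClauses, nbOfRepeats
-- ===== Notes on version B (the rewrite author's own statement) =====
-- stated objective: simpler
-- what changed: A maintains pureClauses/nbOfRepeats incrementally with None markers and a final repair pass that deletes from both dicts; B instead builds one index var -> list of polarities and classifies each variable once in a single final pass.
-- outside the precondition, e.g. on findUnitAndPureClauses([{1: True}, {1: False}], 1): A returns (False, False, False), B returns (False, False, False)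
import Mathlib
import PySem

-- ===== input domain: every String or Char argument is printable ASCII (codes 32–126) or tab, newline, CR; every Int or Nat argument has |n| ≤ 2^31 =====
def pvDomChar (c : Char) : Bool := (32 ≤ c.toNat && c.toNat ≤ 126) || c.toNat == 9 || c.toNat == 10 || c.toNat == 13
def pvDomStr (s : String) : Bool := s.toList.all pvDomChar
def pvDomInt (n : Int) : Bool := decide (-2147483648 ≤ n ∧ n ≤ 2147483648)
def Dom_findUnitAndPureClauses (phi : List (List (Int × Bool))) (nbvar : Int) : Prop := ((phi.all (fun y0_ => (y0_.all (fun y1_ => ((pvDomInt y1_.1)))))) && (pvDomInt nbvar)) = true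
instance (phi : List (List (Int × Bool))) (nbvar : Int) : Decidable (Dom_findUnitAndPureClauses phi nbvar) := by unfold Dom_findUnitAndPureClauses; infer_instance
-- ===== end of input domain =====

-- B replaces A's incremental pure/repeat bookkeeping (None markers + a repair pass that deletes
-- from both dicts) by one polarity index per variable classified in a single final pass ("simpler").

-- ===== PORT A =====
-- each clause reaches the Python as a dict built from the pairs (last value wins, first-occurrence order)
def pvClauseDict (l : List (Int × Bool)) : PySem.Dict Int Bool := PySem.Dict.ofList l

-- first loop of A: collect unit clauses, None state = the early 'return False, False, False'
def pvAUnitStep (st : Option (PySem.Dict Int Bool)) (l : List (Int × Bool)) :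
    Option (PySem.Dict Int Bool) :=
  match st with
  | none => none
  | some uc =>
    if (pvClauseDict l).size = 1 then
      (pvClauseDict l).items.foldl (fun st p =>
        match st with
        | none => none
        | some d =>
          if d.contains p.1 && !(d.get? p.1 == some p.2) then none
          else if !d.contains p.1 then some (d.insert p.1 p.2)
          else some d) (some uc)
    else some uc

-- body of A's second loop (nbOfRepeats update, then pureClauses update)
def pvAStep2 (uc : PySem.Dict Int Bool)
    (st : PySem.Dict Int (Option Bool) × PySem.Dict Int Int) (p : Int × Bool) :
    PySem.Dict Int (Option Bool) × PySem.Dict Int Int :=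
  if uc.contains p.1 then st
  else
    let nb := if st.2.contains p.1 then st.2.insert p.1 (st.2.getD p.1 0 + 1)
              else st.2.insert p.1 1
    let pc := if st.1.contains p.1 then
                (if !(st.1.getD p.1 none == some p.2) then st.1.insert p.1 none else st.1)
              else st.1.insert p.1 (some p.2)
    (pc, nb)

-- body of A's third loop; the key read by 'pureClauses[var]' is always still present
def pvAStep3 (st : PySem.Dict Int (Option Bool) × PySem.Dict Int Int) (p : Int × Option Bool) :
    PySem.Dict Int (Option Bool) × PySem.Dict Int Int :=
  match st.1.getD p.1 none with
  | none => (st.1.erase p.1, st.2)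
  | some _ => (st.1, st.2.erase p.1)

def findUnitAndPureClauses (phi : List (List (Int × Bool))) (nbvar : Int) :
    (List (Int × Bool)) × (List (Int × Bool)) × (List (Int × Int)) :=
  match phi.foldl pvAUnitStep (some PySem.Dict.empty) with
  | none => ([], [], [])   -- Python: 'return False, False, False' (excluded by Pre_)
  | some uc =>
    let st := phi.foldl (fun st l => (pvClauseDict l).items.foldl (pvAStep2 uc) st)
      (PySem.Dict.empty, PySem.Dict.empty)
    let fin := st.1.items.foldl pvAStep3 st
    -- after the deletions every surviving pureClauses value is a bool: project it out
    (uc.items, fin.1.items.filterMap (fun p => p.2.map (fun b => (p.1, b))), fin.2.items)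

-- ===== PORT B =====
-- B pass 1: setdefault-based unit collection, None state = the early 'return False, False, False'
def pvBUnitStep (st : Option (PySem.Dict Int Bool)) (l : List (Int × Bool)) :
    Option (PySem.Dict Int Bool) :=
  match st with
  | none => none
  | some us =>
    if (pvClauseDict l).size = 1 then
      match (pvClauseDict l).items with
      | [(var, value)] =>
        let prev := (us.get? var).getD value     -- prev = us.setdefault(var, value)
        if !(prev == value) then none else some (us.setdefault var value)
      | _ => some us
    else some us

-- B pass 2: occ[var] = list of all polarities of a non-unit var, in order
def pvBOcc (us : PySem.Dict Int Bool) (phi : List (List (Int × Bool))) :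
    PySem.Dict Int (List Bool) :=
  phi.foldl (fun occ l => (pvClauseDict l).items.foldl
    (fun occ p => if !us.contains p.1 then occ.modify p.1 [] (fun vs => vs ++ [p.2]) else occ)
    occ) PySem.Dict.empty

-- B pass 3: classify one indexed variable (occ values are built non-empty)
def pvBClassify (st : PySem.Dict Int Bool × PySem.Dict Int Int) (p : Int × List Bool) :
    PySem.Dict Int Bool × PySem.Dict Int Int :=
  match p.2 with
  | [] => st
  | v :: vs =>
    if (v :: vs).all (fun w => w == v) then (st.1.insert p.1 v, st.2)
    else (st.1, st.2.insert p.1 ((v :: vs).length : Int))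

def findUnitAndPureClauses_alt (phi : List (List (Int × Bool))) (nbvar : Int) :
    (List (Int × Bool)) × (List (Int × Bool)) × (List (Int × Int)) :=
  match phi.foldl pvBUnitStep (some PySem.Dict.empty) with
  | none => ([], [], [])   -- Python: 'return False, False, False' (excluded by Pre_)
  | some us =>
    let st := (pvBOcc us phi).items.foldl pvBClassify (PySem.Dict.empty, PySem.Dict.empty)
    (us.items, st.1.items, st.2.items)

-- ===== PRECONDITION & SPEC =====
-- the (var, polarity) pairs of the unit clauses of phi
def pvUnitLits (phi : List (List (Int × Bool))) : List (Int × Bool) :=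
  phi.filterMap (fun l => match (pvClauseDict l).items with | [p] => some p | _ => none)

-- Pre_ excludes formulas containing two contradictory unit clauses, on which A returns
-- (False, False, False) — booleans, not a value of the declared dict-triple type.
def Pre_findUnitAndPureClauses (phi : List (List (Int × Bool))) (nbvar : Int) : Prop :=
  ∀ p ∈ pvUnitLits phi, ∀ q ∈ pvUnitLits phi, p.1 = q.1 → p.2 = q.2

instance (phi : List (List (Int × Bool))) (nbvar : Int) :
    Decidable (Pre_findUnitAndPureClauses phi nbvar) := by
  unfold Pre_findUnitAndPureClauses; infer_instance

def pvWitness_findUnitAndPureClauses : (List (List (Int × Bool))) × Int :=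
  ([[(1, true)], [(2, false)], [(1, true), (2, true)], [(3, true), (4, false)], [(3, false)]], 4)

def Spec_findUnitAndPureClauses (phi : List (List (Int × Bool))) (nbvar : Int)
    (out : (List (Int × Bool)) × (List (Int × Bool)) × (List (Int × Int))) : Prop :=
  out = findUnitAndPureClauses_alt phi nbvar
instance (phi : List (List (Int × Bool))) (nbvar : Int)
    (out : (List (Int × Bool)) × (List (Int × Bool)) × (List (Int × Int))) :
    Decidable (Spec_findUnitAndPureClauses phi nbvar out) := by
  unfold Spec_findUnitAndPureClauses; infer_instance

-- ===== CLAIM (what is proved, stated in full; the proofs are below) =====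
def Claim_equal_findUnitAndPureClauses : Prop :=
  ∀ (phi : List (List (Int × Bool))) (nbvar : Int), Dom_findUnitAndPureClauses phi nbvar →
    Pre_findUnitAndPureClauses phi nbvar →
    Spec_findUnitAndPureClauses phi nbvar (findUnitAndPureClauses phi nbvar)

-- ===== LEMMAS AND PROOFS =====

-- the body of A's second loop without the unit-variable guard
def pvABody (st : PySem.Dict Int (Option Bool) × PySem.Dict Int Int) (p : Int × Bool) :
    PySem.Dict Int (Option Bool) × PySem.Dict Int Int :=
  let nb := if st.2.contains p.1 then st.2.insert p.1 (st.2.getD p.1 0 + 1)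
            else st.2.insert p.1 1
  let pc := if st.1.contains p.1 then
              (if !(st.1.getD p.1 none == some p.2) then st.1.insert p.1 none else st.1)
            else st.1.insert p.1 (some p.2)
  (pc, nb)

-- the polarities of variable c among the occurrence stream M, in order
def pvVals (M : List (Int × Bool)) (c : Int) : List Bool :=
  (M.filter (fun p => p.1 == c)).map Prod.snd

-- A's pureClauses entry as a function of the polarity list
def pvCollapse : List Bool → Option Bool
  | [] => none
  | v :: vs => if vs.all (fun w => w == v) then some v else none

-- B's purity test as a function of the polarity list
def pvIsPure : List Bool → Bool
  | [] => false
  | v :: vs => vs.all (fun w => w == v)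

theorem pv_collapse_isSome (l : List Bool) : (pvCollapse l).isSome = pvIsPure l := by
  cases l with
  | nil => rfl
  | cons v vs =>
    by_cases h : (vs.all (fun w => w == v)) = true <;> simp [pvCollapse, pvIsPure, h]

theorem pv_filterMap_full {a b : Type} (l : List a) (g : a → Option b) (f : a → b)
    (h : ∀ c ∈ l, g c = some (f c)) : l.filterMap g = l.map f := by
  induction l with
  | nil => rfl
  | cons x xs ih =>
    rw [List.filterMap_cons, h x (List.mem_cons_self), List.map_cons,
      ih (fun c hc => h c (List.mem_cons_of_mem _ hc))]

theorem pv_aStep2_eq (uc : PySem.Dict Int Bool)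
    (st : PySem.Dict Int (Option Bool) × PySem.Dict Int Int) (p : Int × Bool) :
    pvAStep2 uc st p = if (!uc.contains p.1) = true then pvABody st p else st := by
  unfold pvAStep2 pvABody
  by_cases h : uc.contains p.1 = true <;> simp [h]

theorem pv_any_key (K : List Int) (c : Int) (hc : c ∈ K) (Q : Int → Bool) :
    K.any (fun c' => c' == c && Q c') = Q c := by
  cases h : Q c with
  | true => refine List.any_eq_true.mpr ⟨c, hc, ?_⟩; simp [h]
  | false =>
    simp only [List.any_eq_false]
    intro x hx
    by_cases hxc : x = c <;> simp [hxc, h]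

theorem pv_erase_get?_of_ne {ν : Type} (d : PySem.Dict Int ν) (k k' : Int) (h : k' ≠ k) :
    (d.erase k).get? k' = d.get? k' := by
  show ((d.items.filter (fun p => !(p.1 == k))).find? (fun p => p.1 == k')).map Prod.snd
      = (d.items.find? (fun p => p.1 == k')).map Prod.snd
  congr 1
  induction d.items with
  | nil => rfl
  | cons p rest ih =>
    by_cases hp : p.1 = k'
    · simp [hp, h]
    · by_cases hk : p.1 = k <;> simp [hp, hk, ih, Ne.symm h]

theorem pv_erase_items {ν : Type} (d : PySem.Dict Int ν) (k : Int) :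
    (d.erase k).items = d.items.filter (fun p => !(p.1 == k)) := rfl

theorem pv_mem_iff_vals_ne_nil (M : List (Int × Bool)) (c : Int) :
    c ∈ M.map Prod.fst ↔ pvVals M c ≠ [] := by
  unfold pvVals
  simp only [ne_eq, List.map_eq_nil_iff, List.filter_eq_nil_iff, List.mem_map]
  constructor
  · rintro ⟨p, hp, rfl⟩ h; exact h p hp (by simp)
  · intro h
    by_contra hc
    exact h (fun p hp hbeq => hc ⟨p, hp, by simpa using hbeq⟩)

theorem pv_vals_append (M : List (Int × Bool)) (p : Int × Bool) (c : Int) :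
    pvVals (M ++ [p]) c = pvVals M c ++ (if p.1 = c then [p.2] else []) := by
  unfold pvVals
  rw [List.filter_append, List.map_append]
  congr 1
  by_cases h : p.1 = c <;> simp [h]

theorem pv_collapse_snoc (v : Bool) (vs : List Bool) (b : Bool) :
    pvCollapse ((v :: vs) ++ [b]) =
      (if pvCollapse (v :: vs) == some b then pvCollapse (v :: vs) else none) := by
  show pvCollapse (v :: (vs ++ [b])) = _
  simp only [pvCollapse, List.all_append]
  by_cases hb : v = b
  · subst hb; by_cases ha : vs.all (fun w => w == v) <;> simp [ha]
  · have hb' : ¬ b = v := fun h => hb h.symm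
    by_cases ha : vs.all (fun w => w == v) <;> simp [ha, hb, hb']

theorem pv_set_ofList_snoc (l : List Int) (x : Int) :
    PySem.Set.ofList (l ++ [x]) = PySem.Set.add (PySem.Set.ofList l) x := by
  simp [pysem]

theorem pv_set_add (s : PySem.Set Int) (x : Int) :
    PySem.Set.add s x = if x ∈ s then s else s ++ [x] := by
  simp [PySem.Set.add]

theorem pv_unitstep_eq : ∀ (st : Option (PySem.Dict Int Bool)) (l : List (Int × Bool)),
    pvAUnitStep st l = pvBUnitStep st l := by
  intro st l
  cases st with
  | none => rfl
  | some d =>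
    unfold pvAUnitStep pvBUnitStep
    by_cases h : (pvClauseDict l).size = 1
    · simp only [h, if_pos]
      have hlen : (pvClauseDict l).items.length = 1 := h
      obtain ⟨p, hp⟩ := List.length_eq_one_iff.mp hlen
      rw [hp]
      obtain ⟨var, value⟩ := p
      simp only [List.foldl_cons, List.foldl_nil]
      cases hc : d.contains var with
      | false =>
        have hg : d.get? var = none := by
          have := PySem.Dict.contains_eq_isSome_get? d var
          rw [hc] at this
          exact Option.not_isSome_iff_eq_none.mp (by simp [← this])
        rw [PySem.Dict.setdefault_of_not_contains d value hc]
        simp [hc, hg]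
      | true =>
        have hg : (d.get? var).isSome := by
          rw [← PySem.Dict.contains_eq_isSome_get?, hc]
        obtain ⟨w, hw⟩ := Option.isSome_iff_exists.mp hg
        rw [PySem.Dict.setdefault_of_contains d value hc]
        by_cases hwv : w = value <;> simp [hc, hw, hwv]
    · simp [h]

theorem pv_aInv (M : List (Int × Bool)) :
    (M.foldl pvABody (PySem.Dict.empty, PySem.Dict.empty)).1.keys
        = PySem.Set.ofList (M.map Prod.fst)
    ∧ (M.foldl pvABody (PySem.Dict.empty, PySem.Dict.empty)).2.keys
        = PySem.Set.ofList (M.map Prod.fst)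
    ∧ (∀ c, (M.foldl pvABody (PySem.Dict.empty, PySem.Dict.empty)).1.getD c none
        = pvCollapse (pvVals M c))
    ∧ (∀ c, (M.foldl pvABody (PySem.Dict.empty, PySem.Dict.empty)).2.getD c 0
        = ((pvVals M c).length : Int)) := by
  induction M using List.reverseRecOn with
  | nil =>
    refine ⟨by simp [PySem.Dict.keys_empty], by simp [PySem.Dict.keys_empty], ?_, ?_⟩ <;>
      intro c <;> simp [PySem.Dict.getD_empty, pvVals, pvCollapse]
  | append_singleton M p ih =>
    obtain ⟨hk1, hk2, hpc, hnb⟩ := ih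
    rw [List.foldl_append, List.foldl_cons, List.foldl_nil]
    set st := M.foldl pvABody (PySem.Dict.empty, PySem.Dict.empty) with hst
    -- membership facts
    have hmem1 : st.1.contains p.1 = (decide (pvVals M p.1 ≠ []) : Bool) := by
      by_cases hm : p.1 ∈ M.map Prod.fst
      · have : st.1.contains p.1 = true := by
          rw [PySem.Dict.contains_iff_mem_keys, hk1, PySem.Set.mem_ofList]; exact hm
        rw [this]; simp [(pv_mem_iff_vals_ne_nil M p.1).mp hm]
      · have : st.1.contains p.1 = false := by
          rw [Bool.eq_false_iff]
          intro hcon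
          exact hm ((PySem.Set.mem_ofList _ _).mp (by rw [← hk1]; exact (PySem.Dict.contains_iff_mem_keys _ _).mp hcon))
        rw [this]
        have : ¬ (pvVals M p.1 ≠ []) := fun h => hm ((pv_mem_iff_vals_ne_nil M p.1).mpr h)
        simp [this]
    have hmem2 : st.2.contains p.1 = (decide (pvVals M p.1 ≠ []) : Bool) := by
      by_cases hm : p.1 ∈ M.map Prod.fst
      · have : st.2.contains p.1 = true := by
          rw [PySem.Dict.contains_iff_mem_keys, hk2, PySem.Set.mem_ofList]; exact hm
        rw [this]; simp [(pv_mem_iff_vals_ne_nil M p.1).mp hm]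
      · have : st.2.contains p.1 = false := by
          rw [Bool.eq_false_iff]
          intro hcon
          exact hm ((PySem.Set.mem_ofList _ _).mp (by rw [← hk2]; exact (PySem.Dict.contains_iff_mem_keys _ _).mp hcon))
        rw [this]
        have : ¬ (pvVals M p.1 ≠ []) := fun h => hm ((pv_mem_iff_vals_ne_nil M p.1).mpr h)
        simp [this]
    cases hv : pvVals M p.1 with
    | nil =>
      have hc1 : st.1.contains p.1 = false := by rw [hmem1]; simp [hv]
      have hc2 : st.2.contains p.1 = false := by rw [hmem2]; simp [hv]
      have hm : p.1 ∉ M.map Prod.fst := fun h => by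
        have := (pv_mem_iff_vals_ne_nil M p.1).mp h; exact this hv
      refine ⟨?_, ?_, ?_, ?_⟩
      · simp only [pvABody, hc1, hc2, Bool.false_eq_true, if_false]
        rw [PySem.Dict.keys_insert_of_not_contains _ _ hc1, hk1, List.map_append,
          List.map_cons, List.map_nil, pv_set_ofList_snoc, pv_set_add]
        simp [PySem.Set.mem_ofList, hm]
      · simp only [pvABody, hc1, hc2, Bool.false_eq_true, if_false]
        rw [PySem.Dict.keys_insert_of_not_contains _ _ hc2, hk2, List.map_append,
          List.map_cons, List.map_nil, pv_set_ofList_snoc, pv_set_add]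
        simp [PySem.Set.mem_ofList, hm]
      · intro c
        simp only [pvABody, hc1, hc2, Bool.false_eq_true, if_false]
        rw [PySem.Dict.getD_insert, pv_vals_append]
        by_cases hcp : c = p.1
        · simp [hcp, hv, pvCollapse]
        · have : ¬ p.1 = c := fun h => hcp h.symm
          simp [hcp, this, hpc c]
      · intro c
        simp only [pvABody, hc1, hc2, Bool.false_eq_true, if_false]
        rw [PySem.Dict.getD_insert, pv_vals_append]
        by_cases hcp : c = p.1
        · simp [hcp, hv]
        · have : ¬ p.1 = c := fun h => hcp h.symm
          simp [hcp, this, hnb c]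
    | cons v vs =>
      have hc1 : st.1.contains p.1 = true := by rw [hmem1]; simp [hv]
      have hc2 : st.2.contains p.1 = true := by rw [hmem2]; simp [hv]
      have hm : p.1 ∈ M.map Prod.fst := (pv_mem_iff_vals_ne_nil M p.1).mpr (by simp [hv])
      have hkeep : PySem.Set.ofList ((M ++ [p]).map Prod.fst) = PySem.Set.ofList (M.map Prod.fst) := by
        rw [List.map_append, List.map_cons, List.map_nil, pv_set_ofList_snoc, pv_set_add]
        simp [PySem.Set.mem_ofList, hm]
      have hgd : st.1.getD p.1 none = pvCollapse (v :: vs) := by rw [hpc p.1, hv]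
      refine ⟨?_, ?_, ?_, ?_⟩
      · simp only [pvABody, hc1, hc2, if_true, hgd]
        rw [hkeep]
        by_cases hb : (pvCollapse (v :: vs) == some p.2) = true
        · simp [hb, hk1]
        · simp only [Bool.not_eq_true] at hb
          simp [hb, PySem.Dict.keys_insert_of_contains _ _ hc1, hk1]
      · simp only [pvABody, hc1, hc2, if_true]
        rw [hkeep, PySem.Dict.keys_insert_of_contains _ _ hc2, hk2]
      · intro c
        simp only [pvABody, hc1, hc2, if_true, hgd]
        rw [pv_vals_append]
        by_cases hcp : c = p.1
        · subst hcp
          rw [if_pos rfl, hv, pv_collapse_snoc]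
          by_cases hb : (pvCollapse (v :: vs) == some p.2) = true
          · simp [hb, hgd, hv, hpc p.1]
          · simp only [Bool.not_eq_true] at hb
            simp [hb, PySem.Dict.getD_insert]
        · have hpc' : ¬ p.1 = c := fun h => hcp h.symm
          by_cases hb : (pvCollapse (v :: vs) == some p.2) = true
          · simp [hb, hpc', hpc c]
          · simp only [Bool.not_eq_true] at hb
            simp [hb, hpc', PySem.Dict.getD_insert, hcp, hpc c]
      · intro c
        simp only [pvABody, hc1, hc2, if_true]
        rw [pv_vals_append, PySem.Dict.getD_insert]
        by_cases hcp : c = p.1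
        · subst hcp
          rw [if_pos rfl, if_pos rfl, hnb p.1]
          simp
        · have hpc' : ¬ p.1 = c := fun h => hcp h.symm
          simp [hcp, hpc', hnb c]

theorem pv_pass3_spec (olds : List (Int × Option Bool))
    (pc : PySem.Dict Int (Option Bool)) (nb : PySem.Dict Int Int)
    (hin : ∀ p ∈ olds, pc.get? p.1 = some p.2) (hnd : (olds.map Prod.fst).Nodup) :
    (olds.foldl pvAStep3 (pc, nb)).1.items
        = pc.items.filter (fun q => !(olds.any (fun p => p.1 == q.1 && p.2.isNone)))
    ∧ (olds.foldl pvAStep3 (pc, nb)).2.items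
        = nb.items.filter (fun q => !(olds.any (fun p => p.1 == q.1 && p.2.isSome))) := by
  induction olds generalizing pc nb with
  | nil => simp
  | cons hd rest ih =>
    obtain ⟨k, v⟩ := hd
    have hget : pc.get? k = some v := hin (k, v) (List.mem_cons_self)
    have hgd : pc.getD k none = v := PySem.Dict.getD_of_get?_eq_some pc none hget
    have hknotin : k ∉ rest.map Prod.fst := by
      simp only [List.map_cons, List.nodup_cons] at hnd; exact hnd.1
    have hndr : (rest.map Prod.fst).Nodup := by
      simp only [List.map_cons, List.nodup_cons] at hnd; exact hnd.2
    rw [List.foldl_cons]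
    cases v with
    | none =>
      have hstep : pvAStep3 (pc, nb) (k, none) = (pc.erase k, nb) := by
        simp [pvAStep3, hgd]
      rw [hstep]
      have hin' : ∀ p ∈ rest, (pc.erase k).get? p.1 = some p.2 := by
        intro p hp
        have hne : p.1 ≠ k := by
          intro h
          exact hknotin (h ▸ List.mem_map_of_mem (f := Prod.fst) hp)
        rw [pv_erase_get?_of_ne _ _ _ hne]
        exact hin p (List.mem_cons_of_mem _ hp)
      obtain ⟨ih1, ih2⟩ := ih (pc.erase k) nb hin' hndr
      constructor
      · rw [ih1, pv_erase_items, List.filter_filter]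
        apply List.filter_congr
        intro q hq
        by_cases hqk : q.1 = k
        · simp [hqk]
        · have h1 : (q.1 == k) = false := by simp [hqk]
          have h2 : (k == q.1) = false := by
            have : ¬ k = q.1 := fun h => hqk h.symm
            simp [this]
          simp [h1, h2, Bool.and_comm]
      · rw [ih2]
        apply List.filter_congr
        intro q hq
        simp
    | some b =>
      have hstep : pvAStep3 (pc, nb) (k, some b) = (pc, nb.erase k) := by
        simp [pvAStep3, hgd]
      rw [hstep]
      have hin' : ∀ p ∈ rest, pc.get? p.1 = some p.2 := fun p hp =>
        hin p (List.mem_cons_of_mem _ hp)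
      obtain ⟨ih1, ih2⟩ := ih pc (nb.erase k) hin' hndr
      constructor
      · rw [ih1]
        apply List.filter_congr
        intro q hq
        simp
      · rw [ih2, pv_erase_items, List.filter_filter]
        apply List.filter_congr
        intro q hq
        by_cases hqk : q.1 = k
        · simp [hqk]
        · have h1 : (q.1 == k) = false := by simp [hqk]
          have h2 : (k == q.1) = false := by
            have : ¬ k = q.1 := fun h => hqk h.symm
            simp [this]
          simp [h1, h2, Bool.and_comm]

theorem pv_classify_spec (olds : List (Int × List Bool)) (hnd : (olds.map Prod.fst).Nodup) :
    (olds.foldl pvBClassify (PySem.Dict.empty, PySem.Dict.empty)).1.items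
        = (olds.filter (fun p => pvIsPure p.2)).map (fun p => (p.1, p.2.headD true))
    ∧ (olds.foldl pvBClassify (PySem.Dict.empty, PySem.Dict.empty)).2.items
        = (olds.filter (fun p => !pvIsPure p.2 && !p.2.isEmpty)).map
            (fun p => (p.1, (p.2.length : Int))) := by
  induction olds using List.reverseRecOn with
  | nil => constructor <;> rfl
  | append_singleton olds p ih =>
    have hndo : (olds.map Prod.fst).Nodup := by
      rw [List.map_append] at hnd; exact hnd.of_append_left
    have hnotin : p.1 ∉ olds.map Prod.fst := by
      have h2 := hnd
      rw [List.map_append, List.map_cons, List.map_nil] at h2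
      intro hmem
      rcases List.nodup_append.mp h2 with ⟨-, -, hdisj⟩
      exact hdisj p.1 hmem p.1 (List.mem_singleton_self p.1) rfl
    obtain ⟨ih1, ih2⟩ := ih hndo
    rw [List.foldl_append, List.foldl_cons, List.foldl_nil]
    set st := olds.foldl pvBClassify (PySem.Dict.empty, PySem.Dict.empty) with hst
    have hc1 : st.1.contains p.1 = false := by
      rw [Bool.eq_false_iff]
      intro hcon
      have : p.1 ∈ st.1.items.map Prod.fst := (PySem.Dict.contains_iff_mem_keys _ _).mp hcon
      rw [ih1, List.map_map] at this
      obtain ⟨q, hq, hq1⟩ := List.mem_map.mp this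
      exact hnotin (hq1 ▸ List.mem_map_of_mem (List.mem_of_mem_filter hq))
    have hc2 : st.2.contains p.1 = false := by
      rw [Bool.eq_false_iff]
      intro hcon
      have : p.1 ∈ st.2.items.map Prod.fst := (PySem.Dict.contains_iff_mem_keys _ _).mp hcon
      rw [ih2, List.map_map] at this
      obtain ⟨q, hq, hq1⟩ := List.mem_map.mp this
      exact hnotin (hq1 ▸ List.mem_map_of_mem (List.mem_of_mem_filter hq))
    rcases hp : p.2 with _ | ⟨v, vs⟩
    · have hstep : pvBClassify st p = st := by simp [pvBClassify, hp]
      rw [hstep]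
      constructor
      · rw [ih1, List.filter_append, List.map_append]
        simp [pvIsPure, hp]
      · rw [ih2, List.filter_append, List.map_append]
        simp [pvIsPure, hp]
    · by_cases hall : ((v :: vs).all (fun w => w == v)) = true
      · have hstep : pvBClassify st p = (st.1.insert p.1 v, st.2) := by
          simp [pvBClassify, hp, hall]
        rw [hstep]
        have hpure : pvIsPure (v :: vs) = true := by
          simpa [pvIsPure] using (by simpa using hall : (vs.all (fun w => w == v)) = true)
        constructor
        · rw [PySem.Dict.items_insert_of_not_contains _ _ hc1, ih1,
            List.filter_append, List.map_append]
          simp [List.filter_cons, hpure, hp]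
        · rw [ih2, List.filter_append, List.map_append]
          simp [List.filter_cons, hpure, hp]
      · have hstep : pvBClassify st p = (st.1, st.2.insert p.1 ((v :: vs).length : Int)) := by
          simp [pvBClassify, hp, hall]
        rw [hstep]
        have hpure : pvIsPure (v :: vs) = false := by
          have : ¬ (vs.all (fun w => w == v)) = true := by simpa using hall
          simp [pvIsPure, this]
        constructor
        · rw [ih1, List.filter_append, List.map_append]
          simp [List.filter_cons, hpure, hp]
        · rw [PySem.Dict.items_insert_of_not_contains _ _ hc2, ih2,
            List.filter_append, List.map_append]
          simp [List.filter_cons, hpure, hp]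

theorem pv_unit_isSome_aux (ys : List (List (Int × Bool))) (d : PySem.Dict Int Bool)
    (U : List (Int × Bool))
    (hcons : ∀ p ∈ U, ∀ q ∈ U, p.1 = q.1 → p.2 = q.2)
    (hI : ∀ v b, d.get? v = some b → (v, b) ∈ U)
    (hsub : ∀ q ∈ pvUnitLits ys, q ∈ U) :
    ∃ e, ys.foldl pvAUnitStep (some d) = some e := by
  induction ys generalizing d with
  | nil => exact ⟨d, rfl⟩
  | cons l rest ih =>
    rw [List.foldl_cons]
    by_cases hsz : (pvClauseDict l).size = 1
    · obtain ⟨p, hp⟩ := List.length_eq_one_iff.mp (hsz : (pvClauseDict l).items.length = 1)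
      have hpU : p ∈ U := by
        refine hsub p ?_
        unfold pvUnitLits
        rw [List.filterMap_cons, hp]
        exact List.mem_cons_self
      have hsub' : ∀ q ∈ pvUnitLits rest, q ∈ U := by
        intro q hq
        refine hsub q ?_
        unfold pvUnitLits at hq ⊢
        rw [List.filterMap_cons, hp]
        exact List.mem_cons_of_mem _ hq
      have hstep : pvAUnitStep (some d) l = some d ∨
          pvAUnitStep (some d) l = some (d.insert p.1 p.2) := by
        unfold pvAUnitStep
        dsimp only
        rw [if_pos hsz, hp, List.foldl_cons, List.foldl_nil]
        cases hc : d.contains p.1 with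
        | true =>
          have hg : (d.get? p.1).isSome := by
            rw [← PySem.Dict.contains_eq_isSome_get?, hc]
          obtain ⟨w, hw⟩ := Option.isSome_iff_exists.mp hg
          have hwU : (p.1, w) ∈ U := hI p.1 w hw
          have hweq : w = p.2 := hcons (p.1, w) hwU p hpU rfl
          left
          simp [hw, hweq, hc]
        | false =>
          right
          simp [hc]
      rcases hstep with h | h
      · rw [h]; exact ih d hI hsub'
      · rw [h]
        refine ih (d.insert p.1 p.2) ?_ hsub'
        intro v b hvb
        by_cases hv : v = p.1
        · subst hv
          rw [PySem.Dict.get?_insert_self] at hvb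
          cases hvb
          exact hpU
        · rw [PySem.Dict.get?_insert_of_ne d p.2 hv] at hvb
          exact hI v b hvb
    · have hstep : pvAUnitStep (some d) l = some d := by
        unfold pvAUnitStep
        dsimp only
        rw [if_neg hsz]
      have hsub' : ∀ q ∈ pvUnitLits rest, q ∈ U := by
        intro q hq
        refine hsub q ?_
        unfold pvUnitLits at hq ⊢
        rw [List.filterMap_cons]
        have : (match (pvClauseDict l).items with
            | [p] => some p | _ => none : Option (Int × Bool)) = none := by
          rcases hits : (pvClauseDict l).items with _ | ⟨a, _ | ⟨b, t⟩⟩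
          · rfl
          · exact absurd (by rw [hits]; rfl : (pvClauseDict l).items.length = 1) hsz
          · rfl
        rw [this]
        exact hq
      rw [hstep]
      exact ih d hI hsub'

theorem pv_pre_isSome (phi : List (List (Int × Bool))) (nbvar : Int)
    (hpre : Pre_findUnitAndPureClauses phi nbvar) :
    ∃ uc, phi.foldl pvAUnitStep (some PySem.Dict.empty) = some uc := by
  refine pv_unit_isSome_aux phi PySem.Dict.empty (pvUnitLits phi) (by exact hpre) ?_ (fun q hq => hq)
  intro v b h
  rw [PySem.Dict.get?_empty] at h
  cases h

theorem pv_main : ∀ (phi : List (List (Int × Bool))) (nbvar : Int),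
    Pre_findUnitAndPureClauses phi nbvar →
    findUnitAndPureClauses phi nbvar = findUnitAndPureClauses_alt phi nbvar := by
  intro phi nbvar hpre
  obtain ⟨uc, hu0⟩ := pv_pre_isSome phi nbvar hpre
  unfold findUnitAndPureClauses findUnitAndPureClauses_alt
  have hsteps : pvAUnitStep = pvBUnitStep := funext fun st => funext fun l => pv_unitstep_eq st l
  have hu : phi.foldl pvBUnitStep (some PySem.Dict.empty) = some uc := by
    rw [← hsteps]; exact hu0
  rw [hsteps, hu]
  dsimp only
  set M := (phi.flatMap (fun l => (pvClauseDict l).items)).filter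
    (fun p => !uc.contains p.1) with hM
  have hA2 : phi.foldl (fun st l => (pvClauseDict l).items.foldl (pvAStep2 uc) st)
      (PySem.Dict.empty, PySem.Dict.empty)
      = M.foldl pvABody (PySem.Dict.empty, PySem.Dict.empty) := by
    rw [← List.foldl_flatMap]
    have h1 : pvAStep2 uc = fun st p => if (!uc.contains p.1) = true then pvABody st p else st :=
      funext fun st => funext fun p => pv_aStep2_eq uc st p
    rw [h1, hM, List.foldl_filter]
  have hB2 : pvBOcc uc phi
      = M.foldl (fun occ p => occ.modify p.1 [] (fun vs => vs ++ [p.2])) PySem.Dict.empty := by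
    unfold pvBOcc
    rw [← List.foldl_flatMap, hM, List.foldl_filter]
  rw [hA2, hB2]
  obtain ⟨hk1, hk2, hpc, hnb⟩ := pv_aInv M
  set K := PySem.Set.ofList (M.map Prod.fst) with hK
  have hKnd : K.Nodup := PySem.Set.nodup_ofList _
  set st := M.foldl pvABody (PySem.Dict.empty, PySem.Dict.empty) with hst
  set occ := M.foldl (fun occ p => occ.modify p.1 [] (fun vs => vs ++ [p.2]))
    PySem.Dict.empty with hocc
  have hvalsK : ∀ c ∈ K, pvVals M c ≠ [] := fun c hc =>
    (pv_mem_iff_vals_ne_nil M c).mp ((PySem.Set.mem_ofList _ _).mp hc)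
  have hocck : occ.keys = K := by
    have h := PySem.Dict.keys_foldl_modify_key M Prod.fst []
      (fun d x => fun vs => vs ++ [x.2]) PySem.Dict.empty
    rw [PySem.Dict.keys_empty] at h
    exact h
  have hoccg : ∀ c, occ.getD c [] = pvVals M c := by
    intro c
    have h := PySem.Dict.getD_foldl_modify_append M PySem.Dict.empty c
    rw [PySem.Dict.getD_empty] at h
    rw [hocc]
    rw [h]
    simp [pvVals]
  have hst1nd : st.1.keys.Nodup := by rw [hk1]; exact hKnd
  have hpcitems : st.1.items = K.map (fun c => (c, pvCollapse (pvVals M c))) := by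
    rw [PySem.Dict.items_eq_map_keys st.1 hst1nd none, hk1]
    exact List.map_congr_left (fun c _ => by rw [hpc c])
  have hnbitems : st.2.items = K.map (fun c => (c, ((pvVals M c).length : Int))) := by
    rw [PySem.Dict.items_eq_map_keys st.2 (by rw [hk2]; exact hKnd) 0, hk2]
    exact List.map_congr_left (fun c _ => by rw [hnb c])
  have hoccnd : occ.keys.Nodup := by rw [hocck]; exact hKnd
  have hoccitems : occ.items = K.map (fun c => (c, pvVals M c)) := by
    rw [PySem.Dict.items_eq_map_keys occ hoccnd [], hocck]
    exact List.map_congr_left (fun c _ => by rw [hoccg c])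
  have hin : ∀ p ∈ st.1.items, st.1.get? p.1 = some p.2 := by
    intro p hp
    obtain ⟨a, b⟩ := p
    exact PySem.Dict.get?_of_mem_items st.1 hp hst1nd
  have hndolds : (st.1.items.map Prod.fst).Nodup := hst1nd
  have hfin1 : (st.1.items.foldl pvAStep3 st).1.items
      = st.1.items.filter
          (fun q => !(st.1.items.any (fun p => p.1 == q.1 && p.2.isNone))) :=
    (pv_pass3_spec st.1.items st.1 st.2 hin hndolds).1
  have hfin2 : (st.1.items.foldl pvAStep3 st).2.items
      = st.2.items.filter
          (fun q => !(st.1.items.any (fun p => p.1 == q.1 && p.2.isSome))) :=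
    (pv_pass3_spec st.1.items st.1 st.2 hin hndolds).2
  have hndocc : (occ.items.map Prod.fst).Nodup := hoccnd
  obtain ⟨hb1, hb2⟩ := pv_classify_spec occ.items hndocc
  -- the pure-clause components agree
  have hpure : (st.1.items.foldl pvAStep3 st).1.items.filterMap
        (fun p => p.2.map (fun b => (p.1, b)))
      = (occ.items.foldl pvBClassify (PySem.Dict.empty, PySem.Dict.empty)).1.items := by
    rw [hfin1, hb1, hoccitems, hpcitems, List.filter_map, List.filter_map,
      List.filterMap_map, List.map_map]
    have hPA : ∀ c ∈ K,
        ((fun q => !((K.map (fun c => (c, pvCollapse (pvVals M c)))).any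
            (fun p => p.1 == q.1 && p.2.isNone)))
          ∘ (fun c => (c, pvCollapse (pvVals M c)))) c
        = pvIsPure (pvVals M c) := by
      intro c hc
      simp only [Function.comp_apply, List.any_map]
      rw [show ((fun p : Int × Option Bool => p.1 == c && p.2.isNone)
            ∘ (fun c => (c, pvCollapse (pvVals M c))))
          = (fun c' => c' == c && (pvCollapse (pvVals M c')).isNone) from rfl]
      rw [pv_any_key K c hc (fun c' => (pvCollapse (pvVals M c')).isNone)]
      rw [← pv_collapse_isSome]
      cases pvCollapse (pvVals M c) <;> rfl
    have hPB : ∀ c ∈ K,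
        ((fun p : Int × List Bool => pvIsPure p.2) ∘ (fun c => (c, pvVals M c))) c
        = pvIsPure (pvVals M c) := fun c _ => rfl
    rw [List.filter_congr hPA, List.filter_congr hPB]
    apply pv_filterMap_full
    intro c hc
    have hQ := (List.mem_filter.mp hc).2
    simp only [Function.comp_apply]
    rcases hv : pvVals M c with _ | ⟨v, vs⟩
    · rw [hv] at hQ; simp [pvIsPure] at hQ
    · rw [hv] at hQ
      have hall : (vs.all (fun w => w == v)) = true := by simpa [pvIsPure] using hQ
      rw [show pvCollapse (v :: vs) = some v from by simp [pvCollapse, hall]]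
      rfl
  -- the repeat-count components agree
  have hrep : (st.1.items.foldl pvAStep3 st).2.items
      = (occ.items.foldl pvBClassify (PySem.Dict.empty, PySem.Dict.empty)).2.items := by
    rw [hfin2, hb2, hoccitems, hnbitems, hpcitems, List.filter_map, List.filter_map,
      List.map_map]
    have hPA : ∀ c ∈ K,
        ((fun q => !((K.map (fun c => (c, pvCollapse (pvVals M c)))).any
            (fun p => p.1 == q.1 && p.2.isSome)))
          ∘ (fun c => (c, ((pvVals M c).length : Int)))) c
        = !pvIsPure (pvVals M c) := by
      intro c hc
      simp only [Function.comp_apply, List.any_map]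
      rw [show ((fun p : Int × Option Bool => p.1 == c && p.2.isSome)
            ∘ (fun c => (c, pvCollapse (pvVals M c))))
          = (fun c' => c' == c && (pvCollapse (pvVals M c')).isSome) from rfl]
      rw [pv_any_key K c hc (fun c' => (pvCollapse (pvVals M c')).isSome)]
      rw [pv_collapse_isSome]
    have hPB : ∀ c ∈ K,
        ((fun p : Int × List Bool => !pvIsPure p.2 && !p.2.isEmpty)
          ∘ (fun c => (c, pvVals M c))) c
        = !pvIsPure (pvVals M c) := by
      intro c hc
      simp only [Function.comp_apply]
      have hne := hvalsK c hc
      have : (pvVals M c).isEmpty = false := by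
        cases hv : pvVals M c with
        | nil => exact absurd hv hne
        | cons v vs => rfl
      simp [this]
    rw [List.filter_congr hPA, List.filter_congr hPB]
    exact List.map_congr_left (fun c _ => rfl)
  rw [Prod.mk.injEq, Prod.mk.injEq]
  exact ⟨rfl, hpure, hrep⟩

-- ===== VERDICT (by name: the statement is the Claim_ definition above) =====
theorem findUnitAndPureClauses_spec : Claim_equal_findUnitAndPureClauses := by
  intro phi nbvar _ hpre
  unfold Spec_findUnitAndPureClauses
  exact pv_main phi nbvar hpre
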